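-- pv_equiv track=rewrite | github.com/IcebergIdeas/refactor-code-and-career | similar_to_the_same.py | convert
-- ===== SOURCE A (Python) =====
-- def convert(numeral):
--     roman = ""
--     current_number = numeral
--
--     for i in range(current_number):
--         if current_number >= 10:
--             roman += "X"
--             current_number -= 10
--
--     for i in range(0, current_number):
--         roman += "I"
--
--     return roman
-- ===== SOURCE B (Python) =====
-- def convert(numeral):
--     n = max(numeral, 0)
--     return "X" * (n // 10) + "I" * (n % 10)
-- ===== Notes on version B (the rewrite author's own statement) =====
-- stated objective: faster
-- what changed: Replaces A's two counting loops with closed-form arithmetic: the tens digit count of X's concatenated with a units-remainder count of I's, negatives clamped to zero (where A's empty loops yield the empty string).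
import Mathlib
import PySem

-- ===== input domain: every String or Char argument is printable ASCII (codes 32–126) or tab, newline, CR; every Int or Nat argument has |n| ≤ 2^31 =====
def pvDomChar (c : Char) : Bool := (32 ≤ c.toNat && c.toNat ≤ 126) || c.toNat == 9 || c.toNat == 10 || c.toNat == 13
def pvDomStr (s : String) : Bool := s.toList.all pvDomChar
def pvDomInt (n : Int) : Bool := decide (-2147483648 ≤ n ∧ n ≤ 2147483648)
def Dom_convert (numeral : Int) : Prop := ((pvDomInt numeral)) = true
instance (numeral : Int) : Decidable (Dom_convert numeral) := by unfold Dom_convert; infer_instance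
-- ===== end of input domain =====

-- B replaces A's two counting loops by closed-form arithmetic (tens/units); equal return values proved for all ints.

-- ===== PORT A =====
-- one step of A's first loop body: if current_number >= 10: roman += "X"; current_number -= 10
def convertStep (st : String × Int) (_i : Int) : String × Int :=
  if st.2 ≥ 10 then (st.1 ++ "X", st.2 - 10) else st

def convert (numeral : Int) : String :=
  let roman := ""
  let current_number := numeral
  let st := (PySem.List.pyRange 0 current_number 1).foldl convertStep (roman, current_number)
  (PySem.List.pyRange 0 st.2 1).foldl (fun r _ => r ++ "I") st.1

-- ===== PORT B =====
def convert_alt (numeral : Int) : String :=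
  let n := max numeral 0
  String.ofList (List.replicate (PySem.Int.floordiv n 10).toNat 'X')
    ++ String.ofList (List.replicate (PySem.Int.mod n 10).toNat 'I')

-- ===== PRECONDITION & SPEC =====
def Spec_convert (numeral : Int) (out : String) : Prop := out = convert_alt numeral
instance (numeral : Int) (out : String) : Decidable (Spec_convert numeral out) := by unfold Spec_convert; infer_instance

-- ===== CLAIM (what is proved, stated in full; the proofs are below) =====
def Claim_equal_convert : Prop := ∀ (numeral : Int), Dom_convert numeral → Spec_convert numeral (convert numeral)

-- ===== LEMMAS AND PROOFS =====

-- A's first loop: after |l| iterations starting at c (with enough iterations to exhaust the tens),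
-- the roman string has gained c/10 X's and the counter is c % 10.
lemma loopX (l : List Int) (s : String) (c : Int) (h0 : 0 ≤ c) (h : c ≤ 10 * l.length + 9) :
    l.foldl convertStep (s, c)
      = (s ++ String.ofList (List.replicate (c / 10).toNat 'X'), c % 10) := by
  induction l generalizing s c with
  | nil =>
    simp only [List.foldl_nil, List.length_nil] at *
    have h1 : c / 10 = 0 := by omega
    have h2 : c % 10 = c := by omega
    simp only [h1, h2, Int.toNat_zero, List.replicate_zero]
    refine Prod.ext ?_ rfl
    apply String.ext; simp
  | cons a l ih =>
    simp only [List.foldl_cons, List.length_cons] at *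
    by_cases hc : c ≥ 10
    · have hstep : convertStep (s, c) a = (s ++ "X", c - 10) := by
        simp [convertStep, hc]
      rw [hstep, ih (s ++ "X") (c - 10) (by omega) (by omega)]
      have hdiv : ((c - 10) / 10).toNat + 1 = (c / 10).toNat := by omega
      have hmod : (c - 10) % 10 = c % 10 := by omega
      rw [hmod]
      refine Prod.ext ?_ rfl
      show s ++ "X" ++ String.ofList (List.replicate ((c - 10) / 10).toNat 'X')
          = s ++ String.ofList (List.replicate (c / 10).toNat 'X')
      rw [← hdiv]
      apply String.ext
      simp [List.replicate_succ, String.append_assoc]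
    · have hstep : convertStep (s, c) a = (s, c) := by
        simp [convertStep, hc]
      rw [hstep, ih s c h0 (by omega)]

-- A's second loop appends one 'I' per element.
lemma loopI (l : List Int) (s : String) :
    l.foldl (fun r _ => r ++ "I") s = s ++ String.ofList (List.replicate l.length 'I') := by
  induction l generalizing s with
  | nil =>
    simp only [List.foldl_nil, List.length_nil, List.replicate_zero]
    apply String.ext; simp
  | cons a l ih =>
    simp only [List.foldl_cons, List.length_cons, ih]
    apply String.ext
    simp [List.replicate_succ, String.append_assoc]

-- ===== VERDICT (by name: the statement is the Claim_ definition above) =====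
theorem convert_spec : Claim_equal_convert := by
  intro numeral _
  unfold Spec_convert convert convert_alt
  dsimp only
  by_cases hp : 0 < numeral
  · have hmax : max numeral 0 = numeral := by omega
    have hlen : (PySem.List.pyRange 0 numeral 1).length = numeral.toNat := by
      simp [PySem.List.length_pyRange_one]
    rw [loopX _ "" numeral (by omega) (by rw [hlen]; omega)]
    rw [loopI]
    have hfd : PySem.Int.floordiv (max numeral 0) 10 = numeral / 10 := by
      rw [hmax]; exact PySem.Int.floordiv_eq_ediv_of_pos (by norm_num)
    have hmd : PySem.Int.mod (max numeral 0) 10 = numeral % 10 := by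
      rw [hmax]; exact PySem.Int.mod_eq_emod_of_pos (by norm_num)
    have hlen2 : (PySem.List.pyRange 0 (numeral % 10) 1).length = (numeral % 10).toNat := by
      simp [PySem.List.length_pyRange_one]
    rw [hlen2, hfd, hmd]
    apply String.ext
    simp
  · have h1 : PySem.List.pyRange 0 numeral 1 = [] :=
      PySem.List.pyRange_one_eq_nil (by omega)
    have hmax : max numeral 0 = 0 := by omega
    rw [h1]
    simp only [List.foldl_nil]
    rw [PySem.List.pyRange_one_eq_nil (by omega : numeral ≤ 0)]
    rw [hmax]
    simp [PySem.Int.floordiv, PySem.Int.mod]
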